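-- pv_equiv track=rewrite | github.com/ZhuryloAnton/Lux_transfer | trains.py | _extract_train_type
-- ===== SOURCE A (Python) =====
-- _TRAIN_TYPES = frozenset({
--     "ICE", "TGV", "IC", "EC", "RE", "RB", "TER", "IR", "CRE", "CRN",
-- })
--
-- def _extract_train_type(name: str) -> str:
--     """Extract train type from HAFAS departure name like 'TGV 2855' or 'RE 5107'."""
--     token = name.split()[0].upper().rstrip("0123456789") if name else ""
--     # Handle concatenated names like "TER88705" → "TER"
--     if not token:
--         token = ""
--         for ch in name.upper():
--             if ch.isalpha():
--                 token += ch
--             else: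
--                 break
--     return token if token in _TRAIN_TYPES else ""
-- ===== SOURCE B (Python) =====
-- _TRAIN_TYPES_ORDERED = ("ICE", "TGV", "IC", "EC", "RE", "RB", "TER", "IR", "CRE", "CRN")
--
-- def _extract_train_type(name: str) -> str:
--     if not name:
--         return ""
--     word = name.split()[0].upper()
--     for ty in _TRAIN_TYPES_ORDERED:
--         if word.startswith(ty):
--             tail = word[len(ty):]
--             if all(c in "0123456789" for c in tail):
--                 return ty
--     return ""
-- ===== Notes on version B (the rewrite author's own statement) =====
-- stated objective: alternative
-- what changed: Instead of stripping trailing digits off the first token and looking the remainder up in a set (with a dead concatenated-name fallback loop), B scans the ten candidate train types and returns the first one that is a prefix of the uppercased first token followed only by ASCII digits.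
import Mathlib
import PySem

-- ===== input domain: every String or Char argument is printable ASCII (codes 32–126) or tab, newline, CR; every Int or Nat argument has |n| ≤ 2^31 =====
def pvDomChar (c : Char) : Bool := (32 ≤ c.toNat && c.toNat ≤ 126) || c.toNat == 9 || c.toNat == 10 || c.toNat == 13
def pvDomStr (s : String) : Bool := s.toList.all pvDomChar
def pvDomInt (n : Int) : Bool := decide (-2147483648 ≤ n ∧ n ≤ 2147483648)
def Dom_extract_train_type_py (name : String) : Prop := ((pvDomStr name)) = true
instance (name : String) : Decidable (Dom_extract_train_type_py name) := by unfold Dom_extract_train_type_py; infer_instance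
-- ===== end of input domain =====

-- B re-frames A's parse-then-set-lookup (strip trailing digits off the first token, look the
-- remainder up in the frozenset, with a concatenated-name fallback loop) as a single scan over
-- the ten candidate type prefixes; same values wherever both return (objective: alternative).

-- ===== PORT A =====
-- the characters of "0123456789"
def pyDigits : List Char := ['0','1','2','3','4','5','6','7','8','9']
def pyDigit (c : Char) : Bool := pyDigits.contains c

-- _TRAIN_TYPES; membership is taken on the List Char view of the ten string literals
def trainTypes : List (List Char) :=
  [['I','C','E'], ['T','G','V'], ['I','C'], ['E','C'], ['R','E'], ['R','B'],
   ['T','E','R'], ['I','R'], ['C','R','E'], ['C','R','N']]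

-- name.split()[0]; the IndexError case (empty word list) is excluded by Pre_, headD unreached there
def firstWord (cs : List Char) : List Char := (PySem.Chars.split₀ cs).headD []

-- s.rstrip("0123456789") — exact: removes the trailing run of chars of the set, nothing else
def rstripDigits (s : List Char) : List Char := (List.dropWhile pyDigit s.reverse).reverse

-- the literal 'for ch in name.upper(): if ch.isalpha(): token += ch else: break' loop
def aFallback : List Char → List Char → List Char
  | [], acc => acc
  | c :: rest, acc => if PySem.Chars.isalpha c then aFallback rest (acc ++ [c]) else acc

def extract_train_type_py (name : String) : String :=
  let token : List Char :=
    if name.toList ≠ [] then rstripDigits (PySem.Chars.upper (firstWord name.toList)) else []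
  let token : List Char :=
    if token = [] then aFallback (PySem.Chars.upper name.toList) [] else token
  if trainTypes.contains token then String.ofList token else ""

-- ===== PORT B =====
-- the tuple _TRAIN_TYPES_ORDERED of Source B, in its literal order (kept as String literals)
def bTypes : List String := ["ICE", "TGV", "IC", "EC", "RE", "RB", "TER", "IR", "CRE", "CRN"]

-- Source B's  all(c in "0123456789" for c in tail)  generator, consumed element by element
def bAllDigits : List Char → Bool
  | [] => true
  | d :: ds => "0123456789".toList.contains d && bAllDigits ds

-- Source B's for-loop: return the first ty with word.startswith(ty) whose tail
-- word[len(ty):] (a slice from a nonnegative in-range index = List.drop) is all digits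
def bScan (word : List Char) : List String → String
  | [] => ""
  | ty :: more =>
    if PySem.Chars.startswith word ty.toList then
      let tail := word.drop ty.toList.length
      if bAllDigits tail then ty else bScan word more
    else bScan word more

def extract_train_type_py_alt (name : String) : String :=
  if name.toList = [] then ""
  else bScan (((PySem.Chars.split₀ name.toList).headD []).map PySem.Chars.upperChar) bTypes

-- ===== PRECONDITION & SPEC =====
-- Pre_ excludes exactly the whitespace-only nonempty names, on which name.split()[0]
-- raises IndexError (in A and in B alike).
def Pre_extract_train_type_py (name : String) : Prop := PySem.Str.strIsspace name = false
instance (name : String) : Decidable (Pre_extract_train_type_py name) := by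
  unfold Pre_extract_train_type_py; infer_instance

def pvWitness_extract_train_type_py : String := "RE 5107"

def Spec_extract_train_type_py (name : String) (out : String) : Prop := out = extract_train_type_py_alt name
instance (name : String) (out : String) : Decidable (Spec_extract_train_type_py name out) := by unfold Spec_extract_train_type_py; infer_instance

-- ===== CLAIM (what is proved, stated in full; the proofs are below) =====
def Claim_equal_extract_train_type_py : Prop := ∀ (name : String), Dom_extract_train_type_py name → Pre_extract_train_type_py name → Spec_extract_train_type_py name (extract_train_type_py name)

-- ===== LEMMAS AND PROOFS =====

-- split₀.go: the accumulator only prepends the already-finished words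
lemma go_acc (s : List Char) (cur : List Char) (acc : List (List Char)) :
    PySem.Chars.split₀.go s cur acc = acc.reverse ++ PySem.Chars.split₀.go s cur [] := by
  induction s generalizing cur acc with
  | nil =>
    simp only [PySem.Chars.split₀.go]
    by_cases h : cur.isEmpty <;> simp [h]
  | cons c rest ih =>
    simp only [PySem.Chars.split₀.go]
    by_cases hs : PySem.Chars.isspace c <;> by_cases hc : cur.isEmpty <;>
      simp only [hs, hc, if_true, if_false, Bool.false_eq_true]
    · exact ih [] acc
    · rw [ih [] (cur.reverse :: acc), ih [] [cur.reverse]]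
      simp
    · exact ih (c :: cur) acc
    · exact ih (c :: cur) acc

-- split₀.go with a nonempty current word: the first word is cur.reverse ++ the nonspace run of s
lemma go_head (s : List Char) (cur : List Char) (h : cur ≠ []) :
    PySem.Chars.split₀.go s cur [] =
      (cur.reverse ++ s.takeWhile (fun c => !PySem.Chars.isspace c)) ::
        PySem.Chars.split₀ (s.dropWhile (fun c => !PySem.Chars.isspace c)) := by
  induction s generalizing cur with
  | nil => simp [PySem.Chars.split₀.go, h, PySem.Chars.split₀]
  | cons c rest ih =>
    by_cases hs : PySem.Chars.isspace c
    · simp only [PySem.Chars.split₀.go, hs, List.takeWhile_cons, List.dropWhile_cons,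
        Bool.not_eq_true', if_true]
      have hne : cur.isEmpty = false := by simpa using h
      simp only [hne, Bool.false_eq_true, if_false]
      have hstep : PySem.Chars.split₀ (c :: rest) = PySem.Chars.split₀ rest := by
        show PySem.Chars.split₀.go (c :: rest) [] [] = _
        simp [PySem.Chars.split₀.go, hs, PySem.Chars.split₀]
      rw [go_acc]
      simp
      exact hstep.symm
    · have hs' : PySem.Chars.isspace c = false := by simpa using hs
      simp only [PySem.Chars.split₀.go, hs', List.takeWhile_cons, List.dropWhile_cons,
        Bool.false_eq_true, if_false, Bool.not_eq_true']
      rw [ih (c :: cur) (by simp)]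
      simp

lemma split₀_nonspace_cons (c : Char) (cs : List Char) (h : PySem.Chars.isspace c = false) :
    PySem.Chars.split₀ (c :: cs) =
      (c :: cs.takeWhile (fun x => !PySem.Chars.isspace x)) ::
        PySem.Chars.split₀ (cs.dropWhile (fun x => !PySem.Chars.isspace x)) := by
  show PySem.Chars.split₀.go (c :: cs) [] [] = _
  simp only [PySem.Chars.split₀.go, h, Bool.false_eq_true, if_false]
  rw [go_head cs [c] (by simp)]
  simp

lemma split₀_space_append (ws l : List Char) (h : ∀ w ∈ ws, PySem.Chars.isspace w = true) :
    PySem.Chars.split₀ (ws ++ l) = PySem.Chars.split₀ l := by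
  induction ws with
  | nil => simp
  | cons w ws ih =>
    have hw := h w (by simp)
    show PySem.Chars.split₀.go (w :: (ws ++ l)) [] [] = _
    simp only [PySem.Chars.split₀.go, hw, if_true, List.isEmpty_nil]
    exact ih (fun x hx => h x (by simp [hx]))

lemma rstrip_nil_iff (f : List Char) : rstripDigits f = [] ↔ f.all pyDigit = true := by
  simp [rstripDigits, List.dropWhile_eq_nil_iff, List.all_eq_true]

-- rstrip("0123456789") hits t exactly when t is a prefix of f followed only by digits
-- (for a t that does not itself end in a digit)
lemma rstrip_eq_iff (f t : List Char) (hne : t ≠ [])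
    (hlast : ∀ b, t.getLast? = some b → pyDigit b = false) :
    rstripDigits f = t ↔ (t <+: f ∧ (f.drop t.length).all pyDigit = true) := by
  obtain ⟨b, hb⟩ := Option.isSome_iff_exists.mp (List.getLast?_isSome.mpr hne)
  have hbd : pyDigit b = false := hlast b hb
  have hrev : b :: t.reverse.tail = t.reverse :=
    List.cons_head?_tail (by rw [List.head?_reverse]; exact hb)
  constructor
  · intro h
    have hsplit := List.takeWhile_append_dropWhile (p := pyDigit) (l := f.reverse)
    have hf : f = t ++ (f.reverse.takeWhile pyDigit).reverse := by
      conv_lhs => rw [← f.reverse_reverse, ← hsplit]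
      rw [List.reverse_append, h.symm]
      simp [rstripDigits]
    constructor
    · exact hf ▸ List.prefix_append t _
    · rw [hf]
      simp only [List.drop_left, List.all_eq_true]
      intro x hx
      exact List.mem_takeWhile_imp (by simpa using hx)
  · rintro ⟨⟨d, hd⟩, hall⟩
    have hdrop : f.drop t.length = d := by rw [← hd]; simp
    rw [← hd]
    simp only [rstripDigits, List.reverse_append]
    rw [List.dropWhile_append]
    have hdall : ∀ x ∈ d.reverse, pyDigit x = true := by
      intro x hx
      exact List.all_eq_true.mp (hdrop ▸ hall) x (by simpa using hx)
    rw [List.dropWhile_eq_nil_iff.mpr (fun x hx => hdall x hx)]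
    simp only [List.isEmpty_nil, if_true]
    rw [← hrev, List.dropWhile_cons_of_neg (by simp [hbd]), hrev]
    simp

-- Source B's digit generator is the pyDigit-all test
lemma bAllDigits_eq (l : List Char) : bAllDigits l = l.all pyDigit := by
  induction l with
  | nil => simp [bAllDigits]
  | cons d ds ih =>
    have h : ("0123456789".toList) = pyDigits := by decide
    simp [bAllDigits, ih, h, pyDigit]

-- B's scan finds exactly the stripped token when that token is a listed type, else nothing
lemma bScan_eq (f : List Char) (ts : List String)
    (h : ∀ t ∈ ts, t.toList ≠ [] ∧ ∀ b, t.toList.getLast? = some b → pyDigit b = false) :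
    bScan f ts =
      if rstripDigits f ∈ ts.map String.toList then String.ofList (rstripDigits f) else "" := by
  induction ts with
  | nil => simp [bScan]
  | cons t rest ih =>
    obtain ⟨hne, hlast⟩ := h t (by simp)
    have hiff := rstrip_eq_iff f t.toList hne hlast
    simp only [bScan, bAllDigits_eq]
    by_cases hc : (PySem.Chars.startswith f t.toList ∧
        (f.drop t.toList.length).all pyDigit = true)
    · have heq : rstripDigits f = t.toList :=
        hiff.mpr ⟨(PySem.Chars.startswith_iff f t.toList).mp hc.1, hc.2⟩
      rw [if_pos hc.1, if_pos hc.2, heq]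
      simp
    · have hneq : rstripDigits f ≠ t.toList := by
        intro heq
        obtain ⟨h1, h2⟩ := hiff.mp heq
        exact hc ⟨(PySem.Chars.startswith_iff f t.toList).mpr h1, h2⟩
      have hrec : bScan f rest =
          if rstripDigits f ∈ rest.map String.toList then String.ofList (rstripDigits f) else "" :=
        ih (fun t ht => h t (by simp [ht]))
      by_cases hs : PySem.Chars.startswith f t.toList = true
      · have hd : ¬ ((f.drop t.toList.length).all pyDigit = true) := fun hd => hc ⟨hs, hd⟩
        rw [if_pos hs, if_neg hd, hrec]
        simp [List.mem_cons, hneq]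
      · rw [if_neg hs, hrec]
        simp [List.mem_cons, hneq]

lemma digit_not_alpha (c : Char) (h : pyDigit c = true) : PySem.Chars.isalpha c = false := by
  simp [pyDigit, pyDigits] at h
  rcases h with h|h|h|h|h|h|h|h|h|h <;> subst h <;> decide

lemma islower_of_isspace (c : Char) (h : PySem.Chars.isspace c = true) :
    PySem.Chars.islower c = false := by
  simp [PySem.Chars.isspace] at h
  simp [PySem.Chars.islower, Char.le_def, UInt32.le_iff_toNat_le, Char.toNat_val]
  intro h1
  omega

lemma space_upper_not_alpha (c : Char) (h : PySem.Chars.isspace c = true) :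
    PySem.Chars.isalpha (PySem.Chars.upperChar c) = false := by
  have hl := islower_of_isspace c h
  simp only [PySem.Chars.upperChar, hl, Bool.false_eq_true, if_false, PySem.Chars.isalpha,
    Bool.or_eq_false_iff, and_true]
  simp [PySem.Chars.isspace] at h
  simp [PySem.Chars.isupper, Char.le_def, UInt32.le_iff_toNat_le, Char.toNat_val]
  intro h1
  omega

lemma types_ok : ∀ t ∈ bTypes, t.toList ≠ [] ∧
    ∀ b, t.toList.getLast? = some b → pyDigit b = false := by
  intro t ht
  simp only [bTypes, List.mem_cons, List.not_mem_nil, or_false] at ht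
  rcases ht with rfl|rfl|rfl|rfl|rfl|rfl|rfl|rfl|rfl|rfl <;>
    refine ⟨by decide, fun b hb => ?_⟩ <;> simp at hb <;> subst hb <;> decide

-- the types list of B, seen through toList, is A's char-list set
lemma bTypes_toList : bTypes.map String.toList = trainTypes := by decide

-- the head of dropWhile fails the predicate
lemma dropWhile_head_false {p : Char → Bool} {l r : List Char} {c : Char}
    (h : l.dropWhile p = c :: r) : p c = false := by
  induction l with
  | nil => simp at h
  | cons x xs ih =>
    by_cases hx : p x
    · exact ih (by simpa [List.dropWhile_cons, hx] using h)
    · rw [List.dropWhile_cons_of_neg (by simpa using hx)] at h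
      cases h
      simpa using hx

-- ===== VERDICT (by name: the statement is the Claim_ definition above) =====
theorem extract_train_type_py_spec : Claim_equal_extract_train_type_py := by
  intro name hdom hpre
  unfold Spec_extract_train_type_py
  have hpre' : PySem.Chars.strIsspace name.toList = false := hpre
  by_cases hnil : name.toList = []
  · simp [extract_train_type_py, extract_train_type_py_alt, hnil, aFallback,
      PySem.Chars.upper, trainTypes]
  · -- the name has a non-space character
    have hnotall : ¬ (name.toList.all PySem.Chars.isspace = true) := by
      simp only [PySem.Chars.strIsspace, Bool.and_eq_false_iff] at hpre'
      rcases hpre' with h | h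
      · exact absurd (by simpa using h) hnil
      · simp [h]
    have hdw : name.toList.dropWhile PySem.Chars.isspace ≠ [] := by
      rw [Ne, List.dropWhile_eq_nil_iff]
      intro hforall
      exact hnotall (List.all_eq_true.mpr (fun x hx => hforall x hx))
    obtain ⟨c, rest', hcr⟩ := List.exists_cons_of_ne_nil hdw
    have hc : PySem.Chars.isspace c = false := dropWhile_head_false hcr
    have hws : ∀ w ∈ name.toList.takeWhile PySem.Chars.isspace, PySem.Chars.isspace w = true :=
      fun w hw => List.mem_takeWhile_imp hw
    have hdecomp : name.toList = name.toList.takeWhile PySem.Chars.isspace ++ (c :: rest') := by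
      rw [← hcr, List.takeWhile_append_dropWhile]
    have hsplit : PySem.Chars.split₀ name.toList =
        (c :: rest'.takeWhile (fun x => !PySem.Chars.isspace x)) ::
          PySem.Chars.split₀ (rest'.dropWhile (fun x => !PySem.Chars.isspace x)) := by
      rw [hdecomp, split₀_space_append _ _ hws, split₀_nonspace_cons c rest' hc]
    have hfw : firstWord name.toList = c :: rest'.takeWhile (fun x => !PySem.Chars.isspace x) := by
      simp [firstWord, hsplit]
    have hfwB : ((PySem.Chars.split₀ name.toList).headD []).map PySem.Chars.upperChar =
        PySem.Chars.upper (firstWord name.toList) := by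
      simp [firstWord, PySem.Chars.upper]
    set tk := c :: rest'.takeWhile (fun x => !PySem.Chars.isspace x) with htk
    set f := PySem.Chars.upper tk with hf
    have hbs := bScan_eq f bTypes types_ok
    by_cases h0 : rstripDigits f = []
    · -- first token all digits: A falls back to the (empty) alpha-prefix loop, B finds no type
      have hall : f.all pyDigit = true := (rstrip_nil_iff f).mp h0
      have hfb : aFallback (PySem.Chars.upper name.toList) [] = [] := by
        rw [hdecomp]
        cases hwsc : name.toList.takeWhile PySem.Chars.isspace with
        | nil =>
          have hcd : pyDigit (PySem.Chars.upperChar c) = true := by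
            have : PySem.Chars.upperChar c ∈ f := by simp [hf, htk, PySem.Chars.upper]
            exact List.all_eq_true.mp hall _ this
          simp [PySem.Chars.upper, aFallback, digit_not_alpha _ hcd]
        | cons w ws' =>
          have hw : PySem.Chars.isspace w = true := hws w (by rw [hwsc]; simp)
          simp [PySem.Chars.upper, aFallback, space_upper_not_alpha w hw]
      simp only [extract_train_type_py, extract_train_type_py_alt, hnil, if_false,
        ite_not, hfwB, hfw, ← hf, h0, if_true, hfb, hbs, bTypes_toList]
      decide
    · -- the stripped token decides both sides
      simp only [extract_train_type_py, extract_train_type_py_alt, hnil, ite_not, hfwB, hfw,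
        ← hf, if_false, if_neg h0, hbs, bTypes_toList]
      by_cases hm : rstripDigits f ∈ trainTypes
      · rw [if_pos (by simpa using hm), if_pos hm]
      · rw [if_neg (by simpa using hm), if_neg hm]
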